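-- pv_equiv track=rewrite | github.com/SUTPython/Assignment2 | 3/solution.py | find_valid_pairs
-- ===== SOURCE A (Python) =====
-- def find_valid_pairs(powers, allowed_diffs, target_sum, min_distance):
--     result = []
--     n = len(powers)
--
--     # Try all possible pairs
--     for i in range(n):
--         for j in range(i + min_distance, n):
--             a, b = powers[i], powers[j]
--             diff = abs(a - b)
--
--
--             if diff not in allowed_diffs:
--                 continue
--
--             if target_sum is not None and target_sum != "None":
--                 if a + b != target_sum:
--                     continue
--
--
--             pair = sorted([a, b])
--             if pair not in result:
--                 result.append(pair)
--
--     # Sort the result list for consistent output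
--     return sorted(result)
-- ===== SOURCE B (Python) =====
-- def find_valid_pairs(powers, allowed_diffs, target_sum, min_distance):
--     # Map each distinct value to its first and last index of occurrence.
--     idx = {}
--     for i, v in enumerate(powers):
--         if v in idx:
--             idx[v] = (idx[v][0], i)
--         else:
--             idx[v] = (i, i)
--     vals = list(idx)
--     m = len(vals)
--     out = []
--     for p in range(m):
--         for q in range(p, m):
--             x, y = vals[p], vals[q]
--             if abs(x - y) not in allowed_diffs:
--                 continue
--             if target_sum is not None and target_sum != "None":
--                 if x + y != target_sum:
--                     continue
--             xmin, xmax = idx[x]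
--             ymin, ymax = idx[y]
--             if ymax - xmin >= min_distance or xmax - ymin >= min_distance:
--                 out.append(sorted([x, y]))
--     out.sort()
--     return out
-- ===== Notes on version B (the rewrite author's own statement) =====
-- stated objective: alternative
-- what changed: B first builds a dict mapping each distinct value to its first and last index of occurrence, then scans unordered pairs of distinct values and decides the distance constraint by a two-direction max-index minus min-index test, collecting results with a plain append plus one final sort instead of A's quadratic index-pair scan with a linear 'pair not in result' membership scan per hit.
-- outside the precondition, e.g. on find_valid_pairs([1], {0}, None, -2): A raises IndexError, B returns [[1, 1]]
import Mathlib
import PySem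

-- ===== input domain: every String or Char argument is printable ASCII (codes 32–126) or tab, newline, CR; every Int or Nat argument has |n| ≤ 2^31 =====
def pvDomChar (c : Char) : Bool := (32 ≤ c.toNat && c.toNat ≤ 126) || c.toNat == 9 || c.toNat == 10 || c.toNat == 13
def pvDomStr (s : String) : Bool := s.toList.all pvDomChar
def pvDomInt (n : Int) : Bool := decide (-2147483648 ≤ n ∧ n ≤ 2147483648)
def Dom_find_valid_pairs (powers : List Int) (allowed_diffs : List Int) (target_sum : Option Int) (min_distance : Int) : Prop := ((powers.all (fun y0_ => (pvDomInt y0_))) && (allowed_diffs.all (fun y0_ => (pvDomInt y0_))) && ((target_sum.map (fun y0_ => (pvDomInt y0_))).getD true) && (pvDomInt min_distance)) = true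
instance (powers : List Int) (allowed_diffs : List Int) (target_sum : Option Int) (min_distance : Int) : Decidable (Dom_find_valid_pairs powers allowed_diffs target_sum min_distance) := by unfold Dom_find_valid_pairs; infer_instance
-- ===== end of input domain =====

-- B replaces A's index-pair scan with a first/last-occurrence index per distinct value and a scan over
-- unordered distinct value pairs, dropping A's `pair not in result` dedup scans (objective: alternative).

-- ===== PORT A =====
-- literal port of A; `target_sum != "None"` is always True for an int/None target_sum, so only the
-- `is not None` test remains.  powers[j] may see a negative j (wraps) — pyGetD is exact under Pre_.
def find_valid_pairs (powers : List Int) (allowed_diffs : List Int) (target_sum : Option Int) (min_distance : Int) : List (List Int) :=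
  let n : Int := powers.length
  let result : List (List Int) :=
    (PySem.List.pyRange 0 n 1).foldl (fun result i =>
      (PySem.List.pyRange (i + min_distance) n 1).foldl (fun result j =>
        let a := PySem.List.pyGetD powers i 0
        let b := PySem.List.pyGetD powers j 0
        let diff := |a - b|
        if diff ∉ allowed_diffs then result
        else if (match target_sum with | some t => decide (a + b ≠ t) | none => false : Bool) then result
        else
          let pair := PySem.List.sorted [a, b] (fun x => x) false
          if pair ∈ result then result else result ++ [pair]) result) []
  PySem.List.sorted result (fun x => x) false

-- ===== PORT B =====
-- literal port of Source B; the dict value [min,max] is the pair (min,max)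
def find_valid_pairs_alt (powers : List Int) (allowed_diffs : List Int) (target_sum : Option Int) (min_distance : Int) : List (List Int) :=
  let idx : PySem.Dict Int (Int × Int) :=
    (PySem.List.enumerate powers 0).foldl (fun idx iv =>
      match idx.get? iv.2 with
      | some r => idx.insert iv.2 (r.1, iv.1)
      | none   => idx.insert iv.2 (iv.1, iv.1)) PySem.Dict.empty
  let vals := idx.keys
  let m : Int := vals.length
  let out : List (List Int) :=
    (PySem.List.pyRange 0 m 1).foldl (fun out p =>
      (PySem.List.pyRange p m 1).foldl (fun out q =>
        let x := PySem.List.pyGetD vals p 0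
        let y := PySem.List.pyGetD vals q 0
        if |x - y| ∉ allowed_diffs then out
        else if (match target_sum with | some t => decide (x + y ≠ t) | none => false : Bool) then out
        else
          let xr := idx.getD x (0, 0)
          let yr := idx.getD y (0, 0)
          if yr.2 - xr.1 ≥ min_distance ∨ xr.2 - yr.1 ≥ min_distance then
            out ++ [PySem.List.sorted [x, y] (fun x => x) false]
          else out) out) []
  PySem.List.sorted out (fun x => x) false

-- ===== PRECONDITION & SPEC =====
-- Pre_ excludes exactly the inputs where A raises IndexError: a nonempty powers with
-- min_distance < -len(powers) makes A read powers[j] with j < -n.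
def Pre_find_valid_pairs (powers : List Int) (allowed_diffs : List Int) (target_sum : Option Int) (min_distance : Int) : Prop :=
  powers = [] ∨ -(powers.length : Int) ≤ min_distance
instance (powers : List Int) (allowed_diffs : List Int) (target_sum : Option Int) (min_distance : Int) : Decidable (Pre_find_valid_pairs powers allowed_diffs target_sum min_distance) := by
  unfold Pre_find_valid_pairs; infer_instance
def pvWitness_find_valid_pairs : List Int × List Int × Option Int × Int := ([1, 3, 1], [2], none, 1)


def Spec_find_valid_pairs (powers : List Int) (allowed_diffs : List Int) (target_sum : Option Int) (min_distance : Int) (out : List (List Int)) : Prop := out = find_valid_pairs_alt powers allowed_diffs target_sum min_distance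
instance (powers : List Int) (allowed_diffs : List Int) (target_sum : Option Int) (min_distance : Int) (out : List (List Int)) : Decidable (Spec_find_valid_pairs powers allowed_diffs target_sum min_distance out) := by unfold Spec_find_valid_pairs; infer_instance

-- ===== CLAIM (what is proved, stated in full; the proofs are below) =====
def Claim_equal_find_valid_pairs : Prop := ∀ (powers : List Int) (allowed_diffs : List Int) (target_sum : Option Int) (min_distance : Int), Dom_find_valid_pairs powers allowed_diffs target_sum min_distance → Pre_find_valid_pairs powers allowed_diffs target_sum min_distance → Spec_find_valid_pairs powers allowed_diffs target_sum min_distance (find_valid_pairs powers allowed_diffs target_sum min_distance)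

-- ===== LEMMAS AND PROOFS =====

-- proof-side helpers

-- the sorted two-element pair A and B both build
def pvSpair (x y : Int) : List Int := PySem.List.sorted [x, y] (fun x => x) false

-- the common guard: diff allowed, and the target-sum test (always active when target_sum is an int)
def pvG (ad : List Int) (ts : Option Int) (x y : Int) : Bool :=
  decide (|x - y| ∈ ad) && !(match ts with | some t => decide (x + y ≠ t) | none => false)

-- value x occurs at index i and value z at index j with j - i ≥ md
def pvReach (l : List Int) (md : Int) (x z : Int) : Prop :=
  ∃ i j : Nat, i < l.length ∧ j < l.length ∧ l.getD i 0 = x ∧ l.getD j 0 = z ∧ md ≤ (j : Int) - (i : Int)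

-- the common characterisation of a member of either result (before the final sort)
def pvR (l ad : List Int) (ts : Option Int) (md : Int) (y : List Int) : Prop :=
  ∃ x z : Int, pvReach l md x z ∧ pvG ad ts x z = true ∧ y = pvSpair x z

def pvBuild (l : List Int) : PySem.Dict Int (Int × Int) :=
  (PySem.List.enumerate l 0).foldl (fun idx iv =>
    match idx.get? iv.2 with
    | some r => idx.insert iv.2 (r.1, iv.1)
    | none   => idx.insert iv.2 (iv.1, iv.1)) PySem.Dict.empty

def pvFi (l : List Int) (x : Int) : Int := (l.idxOf x : Int)
def pvLi (l : List Int) (x : Int) : Int := (l.length : Int) - 1 - (l.reverse.idxOf x : Int)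

-- elementary facts about pvSpair
lemma pvSpair_eq (x y : Int) : pvSpair x y = if y < x then [y, x] else [x, y] := by
  by_cases h : y < x <;> simp [pvSpair, PySem.List.sorted, PySem.List.insertBy, h]

lemma pvSpair_comm (x y : Int) : pvSpair x y = pvSpair y x := by
  rw [pvSpair_eq, pvSpair_eq]
  rcases lt_trichotomy x y with h | h | h
  · rw [if_neg (by omega), if_pos h]
  · simp [h]
  · rw [if_pos h, if_neg (by omega)]

lemma pvSpair_inj {x y x' y' : Int} (h : pvSpair x y = pvSpair x' y') :
    (x = x' ∧ y = y') ∨ (x = y' ∧ y = x') := by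
  rw [pvSpair_eq, pvSpair_eq] at h
  split_ifs at h <;> simp_all <;> omega

lemma pvG_comm (ad : List Int) (ts : Option Int) (x y : Int) : pvG ad ts x y = pvG ad ts y x := by
  unfold pvG
  rw [abs_sub_comm, add_comm]

-- generic fold-shape lemmas (membership and nodup for the two loop shapes)
lemma pvMem_foldl1_add {γ : Type} (l : List γ) (p : γ → Bool) (f : γ → List Int)
    (s : List (List Int)) (y : List Int) :
    (y ∈ l.foldl (fun s j => if p j then (if f j ∈ s then s else s ++ [f j]) else s) s) ↔
      y ∈ s ∨ ∃ j ∈ l, p j = true ∧ y = f j := by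
  induction l generalizing s with
  | nil => simp
  | cons a tl ih =>
    simp only [List.foldl_cons, ih]
    by_cases hp : p a <;> by_cases hm : f a ∈ s <;>
      simp [hp, hm, List.mem_append, or_assoc] <;>
      constructor <;> rintro h <;> aesop

lemma pvNodup_foldl1_add {γ : Type} (l : List γ) (p : γ → Bool) (f : γ → List Int)
    (s : List (List Int)) (hs : s.Nodup) :
    (l.foldl (fun s j => if p j then (if f j ∈ s then s else s ++ [f j]) else s) s).Nodup := by
  induction l generalizing s with
  | nil => simpa
  | cons a tl ih =>
    simp only [List.foldl_cons]
    apply ih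
    by_cases hp : p a <;> by_cases hm : f a ∈ s <;>
      simp [hp, hm, hs, List.nodup_append]
    exact fun a1 ha1 he => hm (he ▸ ha1)

lemma pvMem_foldl2_add {β γ : Type} (l1 : List β) (g : β → List γ) (p : β → γ → Bool)
    (f : β → γ → List Int) (s : List (List Int)) (y : List Int) :
    (y ∈ l1.foldl (fun s i => (g i).foldl
        (fun s j => if p i j then (if f i j ∈ s then s else s ++ [f i j]) else s) s) s) ↔
      y ∈ s ∨ ∃ i ∈ l1, ∃ j ∈ g i, p i j = true ∧ y = f i j := by
  induction l1 generalizing s with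
  | nil => simp
  | cons a tl ih =>
    simp only [List.foldl_cons, ih, pvMem_foldl1_add]
    aesop

lemma pvNodup_foldl2_add {β γ : Type} (l1 : List β) (g : β → List γ) (p : β → γ → Bool)
    (f : β → γ → List Int) (s : List (List Int)) (hs : s.Nodup) :
    (l1.foldl (fun s i => (g i).foldl
        (fun s j => if p i j then (if f i j ∈ s then s else s ++ [f i j]) else s) s) s).Nodup := by
  induction l1 generalizing s with
  | nil => simpa
  | cons a tl ih => exact ih _ (pvNodup_foldl1_add _ _ _ _ hs)

lemma pvFoldl2_append {β γ δ : Type} (l1 : List β) (g : β → List γ) (p : β → γ → Bool)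
    (f : β → γ → δ) (s : List δ) :
    l1.foldl (fun s i => (g i).foldl (fun s j => if p i j then s ++ [f i j] else s) s) s =
      s ++ l1.flatMap (fun i => ((g i).filter (p i)).map (f i)) := by
  simp only [PySem.List.foldl_append_if]
  rw [PySem.List.foldl_append_eq_flatMap]

-- the two pre-sort accumulator lists, as the ports compute them (definitionally equal to the ports' folds)
def pvAList (powers ad : List Int) (ts : Option Int) (md : Int) : List (List Int) :=
  (PySem.List.pyRange 0 (powers.length : Int) 1).foldl (fun result i =>
    (PySem.List.pyRange (i + md) (powers.length : Int) 1).foldl (fun result j =>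
      let a := PySem.List.pyGetD powers i 0
      let b := PySem.List.pyGetD powers j 0
      let diff := |a - b|
      if diff ∉ ad then result
      else if (match ts with | some t => decide (a + b ≠ t) | none => false : Bool) then result
      else
        let pair := PySem.List.sorted [a, b] (fun x => x) false
        if pair ∈ result then result else result ++ [pair]) result) []

def pvBList (powers ad : List Int) (ts : Option Int) (md : Int) : List (List Int) :=
  (PySem.List.pyRange 0 ((pvBuild powers).keys.length : Int) 1).foldl (fun out p =>
    (PySem.List.pyRange p ((pvBuild powers).keys.length : Int) 1).foldl (fun out q =>
      let x := PySem.List.pyGetD (pvBuild powers).keys p 0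
      let y := PySem.List.pyGetD (pvBuild powers).keys q 0
      if |x - y| ∉ ad then out
      else if (match ts with | some t => decide (x + y ≠ t) | none => false : Bool) then out
      else
        let xr := (pvBuild powers).getD x (0, 0)
        let yr := (pvBuild powers).getD y (0, 0)
        if yr.2 - xr.1 ≥ md ∨ xr.2 - yr.1 ≥ md then
          out ++ [PySem.List.sorted [x, y] (fun x => x) false]
        else out) out) []

lemma pvA_eq (powers ad : List Int) (ts : Option Int) (md : Int) :
    find_valid_pairs powers ad ts md = PySem.List.sorted (pvAList powers ad ts md) (fun x => x) false := rfl

lemma pvB_eq (powers ad : List Int) (ts : Option Int) (md : Int) :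
    find_valid_pairs_alt powers ad ts md = PySem.List.sorted (pvBList powers ad ts md) (fun x => x) false := rfl


lemma pvIdxOf_le (l : List Int) (x : Int) (i : Nat) (h : i < l.length) (hx : l[i] = x) :
    l.idxOf x ≤ i := by
  induction l generalizing i with
  | nil => simp at h
  | cons a tl ih =>
    cases i with
    | zero => simp at hx; simp [hx, List.idxOf_cons_self]
    | succ n =>
      by_cases hax : a = x
      · simp [hax, List.idxOf_cons_self]
      · rw [List.idxOf_cons_ne _ hax]
        have := ih n (by simpa using h) (by simpa using hx)
        omega

-- A's loop body in canonical conditional-add shape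
lemma pvAList_eq (powers ad : List Int) (ts : Option Int) (md : Int) :
    pvAList powers ad ts md =
      (PySem.List.pyRange 0 (powers.length : Int) 1).foldl (fun s i =>
        (PySem.List.pyRange (i + md) (powers.length : Int) 1).foldl (fun s j =>
          if pvG ad ts (PySem.List.pyGetD powers i 0) (PySem.List.pyGetD powers j 0) then
            (if pvSpair (PySem.List.pyGetD powers i 0) (PySem.List.pyGetD powers j 0) ∈ s then s
             else s ++ [pvSpair (PySem.List.pyGetD powers i 0) (PySem.List.pyGetD powers j 0)])
          else s) s) [] := by
  unfold pvAList
  congr 1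
  funext s i
  congr 1
  funext s j
  unfold pvG pvSpair
  cases ts <;>
    by_cases h1 : |PySem.List.pyGetD powers i 0 - PySem.List.pyGetD powers j 0| ∈ ad <;>
    simp [h1] <;> split_ifs <;> simp_all

-- characterisation of A's pre-sort accumulator
lemma pvA_char (powers ad : List Int) (ts : Option Int) (md : Int)
    (hpre : powers = [] ∨ -(powers.length : Int) ≤ md) (y : List Int) :
    (y ∈ pvAList powers ad ts md) ↔ pvR powers ad ts md y := by
  rw [pvAList_eq]
  rw [pvMem_foldl2_add (PySem.List.pyRange 0 (powers.length : Int) 1)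
      (fun i => PySem.List.pyRange (i + md) (powers.length : Int) 1)
      (fun i j => pvG ad ts (PySem.List.pyGetD powers i 0) (PySem.List.pyGetD powers j 0))
      (fun i j => pvSpair (PySem.List.pyGetD powers i 0) (PySem.List.pyGetD powers j 0)) [] y]
  simp only [List.not_mem_nil, false_or]
  constructor
  · rintro ⟨i, hi, j, hj, hg, hy⟩
    rw [PySem.List.mem_pyRange_one] at hi hj
    have hmd' : -(powers.length : Int) ≤ md := by
      rcases hpre with h | h
      · subst h; simp at hi; omega
      · exact h
    have ha : PySem.List.pyGetD powers i 0 = powers.getD i.toNat 0 := by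
      rw [PySem.List.pyGetD_eq_getElem powers 0 hi.1 hi.2]
      exact (List.getD_eq_getElem powers 0 (by omega)).symm
    by_cases hj0 : (0:Int) ≤ j
    · have hb : PySem.List.pyGetD powers j 0 = powers.getD j.toNat 0 := by
        rw [PySem.List.pyGetD_eq_getElem powers 0 hj0 hj.2]
        exact (List.getD_eq_getElem powers 0 (by omega)).symm
      exact ⟨_, _, ⟨i.toNat, j.toNat, by omega, by omega, rfl, rfl, by push_cast; omega⟩,
        by rw [← ha, ← hb]; exact hg, by rw [← ha, ← hb]; exact hy⟩
    · have hk0 : 0 < (-j).toNat := by omega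
      have hkn : (-j).toNat ≤ powers.length := by omega
      have hjk : j = -(((-j).toNat : Nat) : Int) := by omega
      have hb : PySem.List.pyGetD powers j 0 = powers.getD (powers.length - (-j).toNat) 0 := by
        conv_lhs => rw [hjk, PySem.List.pyGetD_neg_natCast powers ((-j).toNat) 0 hk0 hkn]
        exact (List.getD_eq_getElem powers 0 (n := powers.length - (-j).toNat) (by omega)).symm
      exact ⟨_, _, ⟨i.toNat, powers.length - (-j).toNat, by omega, by omega, rfl, rfl,
          by push_cast; omega⟩,
        by rw [← ha, ← hb]; exact hg, by rw [← ha, ← hb]; exact hy⟩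
  · rintro ⟨x, z, ⟨i, j, hi, hj, hxi, hzj, hmd2⟩, hg, hy⟩
    refine ⟨(i : Int), ?_, (j : Int), ?_, ?_, ?_⟩
    · rw [PySem.List.mem_pyRange_one]; constructor <;> [omega; exact_mod_cast hi]
    · rw [PySem.List.mem_pyRange_one]; constructor <;> [omega; exact_mod_cast hj]
    · simp only [PySem.List.pyGetD_natCast]; rw [hxi, hzj]; exact hg
    · simp only [PySem.List.pyGetD_natCast]; rw [hxi, hzj]; exact hy

-- nodup of A's pre-sort accumulator
lemma pvA_nodup (powers ad : List Int) (ts : Option Int) (md : Int) :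
    (pvAList powers ad ts md).Nodup := by
  rw [pvAList_eq]
  exact pvNodup_foldl2_add _ _
    (fun i j => pvG ad ts (PySem.List.pyGetD powers i 0) (PySem.List.pyGetD powers j 0))
    (fun i j => pvSpair (PySem.List.pyGetD powers i 0) (PySem.List.pyGetD powers j 0)) [] List.nodup_nil

-- the dict built by B maps each value to its first and last index of occurrence
lemma pvContains_eq {κ ν : Type} [BEq κ] (d : PySem.Dict κ ν) (k : κ) :
    d.contains k = (d.get? k).isSome := by
  simp only [PySem.Dict.contains, PySem.Dict.get?, Option.isSome_map]
  exact Eq.symm List.isSome_find?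

lemma pvKeys_insert {κ ν : Type} [BEq κ] [LawfulBEq κ] (d : PySem.Dict κ ν) (k : κ) (v : ν) :
    (d.insert k v).keys = if d.contains k then d.keys else d.keys ++ [k] := by
  by_cases h : d.contains k
  · simp only [PySem.Dict.insert, h, if_true, PySem.Dict.keys, List.map_map]
    exact List.map_congr_left (fun (p : κ × ν) _ => by
      by_cases hp : p.1 == k <;> simp_all [Function.comp])
  · simp [PySem.Dict.insert, h, PySem.Dict.keys]

lemma pvBuild_spec (l : List Int) :
    (pvBuild l).keys = PySem.List.dedup l ∧
    ∀ x : Int, (pvBuild l).get? x =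
      if x ∈ l then some (pvFi l x, pvLi l x) else none := by
  induction l using List.reverseRecOn with
  | nil => constructor <;> simp [pvBuild, PySem.List.enumerate, PySem.Dict.get?, PySem.Dict.empty, PySem.Dict.keys, PySem.List.dedup]
  | append_singleton ps v ih =>
    obtain ⟨ihk, ihg⟩ := ih
    have hstep : pvBuild (ps ++ [v]) =
        (match (pvBuild ps).get? v with
         | some r => (pvBuild ps).insert v (r.1, (ps.length : Int))
         | none   => (pvBuild ps).insert v ((ps.length : Int), (ps.length : Int))) := by
      unfold pvBuild
      rw [PySem.List.enumerate_append, List.foldl_append]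
      simp [PySem.List.enumerate_cons, PySem.List.enumerate_nil]
    by_cases hv : v ∈ ps
    · rw [hstep, ihg v, if_pos hv]
      constructor
      · rw [pvKeys_insert, pvContains_eq, ihg v]
        simp only [if_pos hv, Option.isSome_some, if_true, ihk]
        rw [PySem.List.dedup_eq_ofList, PySem.List.dedup_eq_ofList, PySem.Set.ofList_append_singleton]
        exact (PySem.Set.add_of_mem (by rw [PySem.Set.mem_ofList]; exact hv)).symm
      · intro x
        by_cases hx : x = v
        · subst hx
          rw [PySem.Dict.get?_insert_self, if_pos (by simp [hv])]
          simp only [Option.some.injEq, Prod.mk.injEq]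
          constructor
          · simp [pvFi, List.idxOf_append_of_mem hv]
          · simp [pvLi, List.reverse_append, List.idxOf_cons_self]
        · rw [PySem.Dict.get?_insert_of_ne (pvBuild ps) _ hx, ihg x]
          by_cases hxl : x ∈ ps
          · rw [if_pos hxl, if_pos (by simp [hxl])]
            simp only [Option.some.injEq, Prod.mk.injEq]
            constructor
            · simp [pvFi, List.idxOf_append_of_mem hxl]
            · simp only [pvLi, List.reverse_append, List.reverse_singleton, List.singleton_append,
                List.idxOf_cons_ne _ (by exact fun h => hx h.symm), List.length_append]
              simp only [List.length_singleton]; push_cast; omega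
          · rw [if_neg hxl, if_neg (by simp [hxl, hx])]
    · rw [hstep, ihg v, if_neg hv]
      constructor
      · rw [pvKeys_insert, pvContains_eq, ihg v]
        simp only [if_neg hv, Option.isSome_none, Bool.false_eq_true, if_false, ihk]
        rw [PySem.List.dedup_eq_ofList, PySem.List.dedup_eq_ofList, PySem.Set.ofList_append_singleton]
        exact (PySem.Set.add_of_not_mem (by rw [PySem.Set.mem_ofList]; exact hv)).symm
      · intro x
        by_cases hx : x = v
        · subst hx
          rw [PySem.Dict.get?_insert_self, if_pos (by simp)]
          simp only [Option.some.injEq, Prod.mk.injEq]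
          constructor
          · simp [pvFi, List.idxOf_append_of_notMem hv]
          · simp [pvLi, List.reverse_append, List.idxOf_cons_self]
        · rw [PySem.Dict.get?_insert_of_ne (pvBuild ps) _ hx, ihg x]
          by_cases hxl : x ∈ ps
          · rw [if_pos hxl, if_pos (by simp [hxl])]
            simp only [Option.some.injEq, Prod.mk.injEq]
            constructor
            · simp [pvFi, List.idxOf_append_of_mem hxl]
            · simp only [pvLi, List.reverse_append, List.reverse_singleton, List.singleton_append,
                List.idxOf_cons_ne _ (by exact fun h => hx h.symm), List.length_append]
              simp only [List.length_singleton]; push_cast; omega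
          · rw [if_neg hxl, if_neg (by simp [hxl, hx])]


-- B's filter condition, as a single Bool
def pvPB (powers ad : List Int) (ts : Option Int) (md : Int) (p q : Int) : Bool :=
  pvG ad ts (PySem.List.pyGetD (pvBuild powers).keys p 0) (PySem.List.pyGetD (pvBuild powers).keys q 0) &&
  decide (((pvBuild powers).getD (PySem.List.pyGetD (pvBuild powers).keys q 0) (0, 0)).2 -
            ((pvBuild powers).getD (PySem.List.pyGetD (pvBuild powers).keys p 0) (0, 0)).1 ≥ md ∨
          ((pvBuild powers).getD (PySem.List.pyGetD (pvBuild powers).keys p 0) (0, 0)).2 -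
            ((pvBuild powers).getD (PySem.List.pyGetD (pvBuild powers).keys q 0) (0, 0)).1 ≥ md)

-- B's loop as a flatMap of filtered maps
lemma pvBList_eq (powers ad : List Int) (ts : Option Int) (md : Int) :
    pvBList powers ad ts md =
      (PySem.List.pyRange 0 ((pvBuild powers).keys.length : Int) 1).flatMap (fun p =>
        ((PySem.List.pyRange p ((pvBuild powers).keys.length : Int) 1).filter
            (fun q => pvPB powers ad ts md p q)).map
          (fun q => pvSpair (PySem.List.pyGetD (pvBuild powers).keys p 0)
                            (PySem.List.pyGetD (pvBuild powers).keys q 0))) := by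
  unfold pvBList
  have hbody : (fun (out : List (List Int)) (p : Int) =>
      (PySem.List.pyRange p ((pvBuild powers).keys.length : Int) 1).foldl (fun out q =>
        let x := PySem.List.pyGetD (pvBuild powers).keys p 0
        let y := PySem.List.pyGetD (pvBuild powers).keys q 0
        if |x - y| ∉ ad then out
        else if (match ts with | some t => decide (x + y ≠ t) | none => false : Bool) then out
        else
          let xr := (pvBuild powers).getD x (0, 0)
          let yr := (pvBuild powers).getD y (0, 0)
          if yr.2 - xr.1 ≥ md ∨ xr.2 - yr.1 ≥ md then
            out ++ [PySem.List.sorted [x, y] (fun x => x) false]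
          else out) out) =
      (fun (out : List (List Int)) (p : Int) =>
        (PySem.List.pyRange p ((pvBuild powers).keys.length : Int) 1).foldl (fun out q =>
          if pvPB powers ad ts md p q then
            out ++ [pvSpair (PySem.List.pyGetD (pvBuild powers).keys p 0)
                            (PySem.List.pyGetD (pvBuild powers).keys q 0)]
          else out) out) := by
    funext out p
    congr 1
    funext out q
    unfold pvPB pvG pvSpair
    cases ts <;>
      by_cases h1 : |PySem.List.pyGetD (pvBuild powers).keys p 0 -
        PySem.List.pyGetD (pvBuild powers).keys q 0| ∈ ad <;>
      simp [h1] <;> split_ifs <;> simp_all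
  rw [hbody, pvFoldl2_append]
  simp

-- getD on a nodup list is injective on indices
lemma pvGetD_inj (L : List Int) (hL : L.Nodup) (p q : Nat) (hp : p < L.length)
    (hq : q < L.length) (h : L.getD p 0 = L.getD q 0) : p = q := by
  rw [List.getD_eq_getElem L 0 hp, List.getD_eq_getElem L 0 hq] at h
  exact (List.Nodup.getElem_inj_iff hL).mp h

lemma pvFi_spec (l : List Int) (x : Int) (h : x ∈ l) :
    0 ≤ pvFi l x ∧ (pvFi l x).toNat < l.length ∧ l.getD (pvFi l x).toNat 0 = x ∧
      ∀ i : Nat, i < l.length → l.getD i 0 = x → pvFi l x ≤ (i : Int) := by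
  have hlt : l.idxOf x < l.length := List.idxOf_lt_length_of_mem h
  refine ⟨by simp [pvFi], by simpa [pvFi] using hlt, ?_, ?_⟩
  · simp only [pvFi, Int.toNat_natCast]
    rw [List.getD_eq_getElem l 0 hlt]
    exact List.getElem_idxOf hlt
  · intro i hi hx
    rw [List.getD_eq_getElem l 0 hi] at hx
    have := pvIdxOf_le l x i hi hx
    simp only [pvFi]
    omega

lemma pvLi_spec (l : List Int) (x : Int) (h : x ∈ l) :
    0 ≤ pvLi l x ∧ (pvLi l x).toNat < l.length ∧ l.getD (pvLi l x).toNat 0 = x ∧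
      ∀ j : Nat, j < l.length → l.getD j 0 = x → (j : Int) ≤ pvLi l x := by
  have hr : x ∈ l.reverse := by simpa using h
  have hlt : l.reverse.idxOf x < l.length := by
    simpa using List.idxOf_lt_length_of_mem hr
  have hval : l.reverse[l.reverse.idxOf x]'(by simpa using hlt) = x :=
    List.getElem_idxOf (by simpa using hlt)
  rw [List.getElem_reverse] at hval
  refine ⟨by simp [pvLi]; omega, by simp [pvLi]; omega, ?_, ?_⟩
  · have hidx : (pvLi l x).toNat = l.length - 1 - l.reverse.idxOf x := by
      simp only [pvLi]; omega
    rw [hidx, List.getD_eq_getElem l 0 (by omega)]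
    exact hval
  · intro j hj hx
    rw [List.getD_eq_getElem l 0 hj] at hx
    have hrev : l.reverse[l.length - 1 - j]'(by simp; omega) = x := by
      rw [List.getElem_reverse]
      convert hx using 2
      omega
    have := pvIdxOf_le l.reverse x (l.length - 1 - j) (by simp; omega) hrev
    simp only [pvLi]
    omega

-- feasibility of the distance test, in terms of first/last occurrences
lemma pvReach_iff (l : List Int) (md x z : Int) (hx : x ∈ l) (hz : z ∈ l) :
    pvReach l md x z ↔ md ≤ pvLi l z - pvFi l x := by
  obtain ⟨hf0, hflt, hfv, hfmin⟩ := pvFi_spec l x hx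
  obtain ⟨hl0, hllt, hlv, hlmax⟩ := pvLi_spec l z hz
  constructor
  · rintro ⟨i, j, hi, hj, hxi, hzj, hmd⟩
    have h1 := hfmin i hi hxi
    have h2 := hlmax j hj hzj
    omega
  · intro hmd
    exact ⟨(pvFi l x).toNat, (pvLi l z).toNat, hflt, hllt, hfv, hlv, by omega⟩

-- getD of the built dict at a member value
lemma pvGetD_build (powers : List Int) (x : Int) (hx : x ∈ powers) :
    (pvBuild powers).getD x (0, 0) = (pvFi powers x, pvLi powers x) := by
  rw [PySem.Dict.getD, (pvBuild_spec powers).2 x, if_pos hx]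
  rfl


lemma pvPyGetD_getD (L : List Int) (p : Int) (h0 : 0 ≤ p) (hlt : p < (L.length : Int)) :
    PySem.List.pyGetD L p 0 = L.getD p.toNat 0 := by
  rw [PySem.List.pyGetD_eq_getElem L 0 h0 hlt]
  exact (List.getD_eq_getElem L 0 (by omega)).symm

lemma pvGetD_mem (L : List Int) (p : Nat) (h : p < L.length) : L.getD p 0 ∈ L := by
  rw [List.getD_eq_getElem L 0 h]
  exact List.getElem_mem h

-- characterisation of B's pre-sort list
lemma pvB_char (powers ad : List Int) (ts : Option Int) (md : Int) (y : List Int) :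
    (y ∈ pvBList powers ad ts md) ↔ pvR powers ad ts md y := by
  rw [pvBList_eq]
  simp only [List.mem_flatMap, List.mem_map, List.mem_filter]
  have hkeys : (pvBuild powers).keys = PySem.List.dedup powers := (pvBuild_spec powers).1
  have hmemL : ∀ w : Int, w ∈ (pvBuild powers).keys ↔ w ∈ powers := by
    intro w; rw [hkeys]; exact PySem.List.mem_dedup powers w
  constructor
  · rintro ⟨p, hp, q, ⟨⟨hq, hpb⟩, hy⟩⟩
    rw [PySem.List.mem_pyRange_one] at hp hq
    have hxg := pvPyGetD_getD (pvBuild powers).keys p hp.1 hp.2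
    have hzg := pvPyGetD_getD (pvBuild powers).keys q (by omega) hq.2
    have hxmem : (pvBuild powers).keys.getD p.toNat 0 ∈ powers := by
      rw [← hmemL]; exact pvGetD_mem _ _ (by omega)
    have hzmem : (pvBuild powers).keys.getD q.toNat 0 ∈ powers := by
      rw [← hmemL]; exact pvGetD_mem _ _ (by omega)
    unfold pvPB at hpb
    rw [Bool.and_eq_true, decide_eq_true_eq] at hpb
    obtain ⟨hg, hor⟩ := hpb
    rw [hxg, hzg] at hg hor hy
    rw [pvGetD_build powers _ hxmem, pvGetD_build powers _ hzmem] at hor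
    rcases hor with h1 | h1
    · exact ⟨_, _, (pvReach_iff powers md _ _ hxmem hzmem).2 (by omega), hg, hy.symm⟩
    · refine ⟨_, _, (pvReach_iff powers md _ _ hzmem hxmem).2 (by omega), ?_, ?_⟩
      · rw [pvG_comm]; exact hg
      · rw [pvSpair_comm]; exact hy.symm
  · rintro ⟨x, z, hreach, hg, hy⟩
    obtain ⟨i, j, hi, hj, hxi, hzj, hmd2⟩ := hreach
    have hxmem : x ∈ powers := hxi ▸ pvGetD_mem powers i hi
    have hzmem : z ∈ powers := hzj ▸ pvGetD_mem powers j hj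
    have hxL : x ∈ (pvBuild powers).keys := (hmemL x).2 hxmem
    have hzL : z ∈ (pvBuild powers).keys := (hmemL z).2 hzmem
    have hpx : (pvBuild powers).keys.idxOf x < (pvBuild powers).keys.length :=
      List.idxOf_lt_length_of_mem hxL
    have hpz : (pvBuild powers).keys.idxOf z < (pvBuild powers).keys.length :=
      List.idxOf_lt_length_of_mem hzL
    have hvx : (pvBuild powers).keys.getD ((pvBuild powers).keys.idxOf x) 0 = x := by
      rw [List.getD_eq_getElem _ 0 hpx]; exact List.getElem_idxOf hpx
    have hvz : (pvBuild powers).keys.getD ((pvBuild powers).keys.idxOf z) 0 = z := by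
      rw [List.getD_eq_getElem _ 0 hpz]; exact List.getElem_idxOf hpz
    have hcond : md ≤ pvLi powers z - pvFi powers x :=
      (pvReach_iff powers md x z hxmem hzmem).1 ⟨i, j, hi, hj, hxi, hzj, hmd2⟩
    by_cases hpq : (pvBuild powers).keys.idxOf x ≤ (pvBuild powers).keys.idxOf z
    · refine ⟨((pvBuild powers).keys.idxOf x : Int), ?_, ((pvBuild powers).keys.idxOf z : Int),
        ⟨⟨?_, ?_⟩, ?_⟩⟩
      · rw [PySem.List.mem_pyRange_one]; constructor <;> [omega; exact_mod_cast hpx]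
      · rw [PySem.List.mem_pyRange_one]; constructor <;> [exact_mod_cast hpq; exact_mod_cast hpz]
      · unfold pvPB
        rw [Bool.and_eq_true, decide_eq_true_eq]
        rw [pvPyGetD_getD _ _ (by omega) (by exact_mod_cast hpx),
            pvPyGetD_getD _ _ (by omega) (by exact_mod_cast hpz)]
        simp only [Int.toNat_natCast]
        rw [hvx, hvz, pvGetD_build powers x hxmem, pvGetD_build powers z hzmem]
        exact ⟨hg, Or.inl (by omega)⟩
      · rw [pvPyGetD_getD _ _ (by omega) (by exact_mod_cast hpx),
            pvPyGetD_getD _ _ (by omega) (by exact_mod_cast hpz)]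
        simp only [Int.toNat_natCast]
        rw [hvx, hvz]
        exact hy.symm
    · refine ⟨((pvBuild powers).keys.idxOf z : Int), ?_, ((pvBuild powers).keys.idxOf x : Int),
        ⟨⟨?_, ?_⟩, ?_⟩⟩
      · rw [PySem.List.mem_pyRange_one]; constructor <;> [omega; exact_mod_cast hpz]
      · rw [PySem.List.mem_pyRange_one]
        constructor <;> [exact_mod_cast (by omega : (pvBuild powers).keys.idxOf z ≤ (pvBuild powers).keys.idxOf x); exact_mod_cast hpx]
      · unfold pvPB
        rw [Bool.and_eq_true, decide_eq_true_eq]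
        rw [pvPyGetD_getD _ _ (by omega) (by exact_mod_cast hpz),
            pvPyGetD_getD _ _ (by omega) (by exact_mod_cast hpx)]
        simp only [Int.toNat_natCast]
        rw [hvx, hvz, pvGetD_build powers x hxmem, pvGetD_build powers z hzmem]
        refine ⟨by rw [pvG_comm]; exact hg, Or.inr (by omega)⟩
      · rw [pvPyGetD_getD _ _ (by omega) (by exact_mod_cast hpz),
            pvPyGetD_getD _ _ (by omega) (by exact_mod_cast hpx)]
        simp only [Int.toNat_natCast]
        rw [hvx, hvz, pvSpair_comm]
        exact hy.symm

-- nodup of B's pre-sort list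
lemma pvB_nodup (powers ad : List Int) (ts : Option Int) (md : Int) :
    (pvBList powers ad ts md).Nodup := by
  rw [pvBList_eq, List.nodup_flatMap]
  have hL : (pvBuild powers).keys.Nodup := by
    rw [(pvBuild_spec powers).1]; exact PySem.List.nodup_dedup powers
  have hinj : ∀ p q : Int, 0 ≤ p → p < ((pvBuild powers).keys.length : Int) → 0 ≤ q →
      q < ((pvBuild powers).keys.length : Int) →
      PySem.List.pyGetD (pvBuild powers).keys p 0 = PySem.List.pyGetD (pvBuild powers).keys q 0 →
      p = q := by
    intro p q h0p hlp h0q hlq he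
    rw [pvPyGetD_getD _ _ h0p hlp, pvPyGetD_getD _ _ h0q hlq] at he
    have := pvGetD_inj _ hL p.toNat q.toNat (by omega) (by omega) he
    omega
  constructor
  · intro p hp
    rw [PySem.List.mem_pyRange_one] at hp
    refine List.Nodup.map_on ?_ ((PySem.List.nodup_pyRange_one _ _).filter _)
    intro q1 hq1 q2 hq2 heq
    rw [List.mem_filter, PySem.List.mem_pyRange_one] at hq1 hq2
    rcases pvSpair_inj heq with ⟨_, h2⟩ | ⟨h1, h2⟩
    · exact hinj q1 q2 (by omega) (by omega) (by omega) (by omega) h2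
    · have e1 := hinj p q2 (by omega) (by omega) (by omega) (by omega) h1
      have e2 := hinj q1 p (by omega) (by omega) (by omega) (by omega) h2
      omega
  · refine (PySem.List.pairwise_lt_pyRange_one (a := 0)
      (b := ((pvBuild powers).keys.length : Int))).imp_of_mem ?_
    intro p p' hp hp' hlt
    rw [PySem.List.mem_pyRange_one] at hp hp'
    intro a ha ha'
    rw [List.mem_map] at ha ha'
    obtain ⟨q, hq, hqa⟩ := ha
    obtain ⟨q', hq', hqa'⟩ := ha'
    rw [List.mem_filter, PySem.List.mem_pyRange_one] at hq hq'
    have heq : pvSpair (PySem.List.pyGetD (pvBuild powers).keys p 0)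
        (PySem.List.pyGetD (pvBuild powers).keys q 0) =
        pvSpair (PySem.List.pyGetD (pvBuild powers).keys p' 0)
        (PySem.List.pyGetD (pvBuild powers).keys q' 0) := by rw [hqa, hqa']
    rcases pvSpair_inj heq with ⟨h1, _⟩ | ⟨h1, h2⟩
    · have := hinj p p' (by omega) (by omega) (by omega) (by omega) h1
      omega
    · have e1 := hinj p q' (by omega) (by omega) (by omega) (by omega) h1
      have e2 := hinj q p' (by omega) (by omega) (by omega) (by omega) h2
      omega

-- sorting two permuted nodup lists of pairs gives the same list
lemma pvSorted_perm_eq (xs ys : List (List Int)) (h : xs.Perm ys) :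
    PySem.List.sorted xs (fun x => x) false = PySem.List.sorted ys (fun x => x) false := by
  have h1 : ∀ zs : List (List Int), PySem.List.sorted zs (fun x => x) false =
      @PySem.List.sorted _ _ List.instLinearOrder.toLT LinearOrder.toDecidableLT zs (fun x => x) false := by
    intro zs
    simp only [PySem.List.sorted]
    congr 1
    funext acc x
    congr 1
    funext a b
    exact decide_eq_decide.mpr Iff.rfl
  rw [h1, h1]
  exact (PySem.List.sorted_id_eq_sorted_id_iff_perm _ _).2 h


-- ===== VERDICT (by name: the statement is the Claim_ definition above) =====
theorem find_valid_pairs_spec : Claim_equal_find_valid_pairs := by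
  unfold Claim_equal_find_valid_pairs
  intro powers ad ts md _ hpre
  unfold Spec_find_valid_pairs Pre_find_valid_pairs at *
  rw [pvA_eq, pvB_eq]
  apply pvSorted_perm_eq
  rw [List.perm_ext_iff_of_nodup (pvA_nodup powers ad ts md) (pvB_nodup powers ad ts md)]
  intro y
  rw [pvA_char powers ad ts md hpre y, pvB_char powers ad ts md y]
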